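-- pv_equiv track=rewrite | github.com/EthanSedgwick/EthanLauncher | scr/mainWindow.py | _parse_event_modifiers_content
-- ===== SOURCE A (Python) =====
-- def _parse_event_modifiers_content(content):
--     """
--     Parse event_modifiers.txt: key=value lines, # is comment. Values can be multi-line
--     if they contain { ; keep reading until matching }.
--     Returns list of (key, value) in order; value may contain newlines.
--     """
--     pairs = []
--     lines = content.splitlines()
--     i = 0
--     while i < len(lines):
--         line = lines[i]
--         s = line.strip()
--         if not s or s.startswith("#"):
--             i += 1
--             continue
--         if "=" not in s:
--             i += 1
--             continue
--         key, value = s.split("=", 1)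
--         key = key.strip()
--         value = value.strip()
--         if "{" in value:
--             depth = value.count("{") - value.count("}")
--             while depth > 0 and i + 1 < len(lines):
--                 i += 1
--                 next_line = lines[i]
--                 value += "\n" + next_line
--                 depth += next_line.count("{") - next_line.count("}")
--             value = value.strip()
--         pairs.append((key, value))
--         i += 1
--     return pairs
-- ===== SOURCE B (Python) =====
-- def _parse_event_modifiers_content(content):
--     """Single flat pass over the lines with a mode flag and a running brace
--     depth, instead of A's nested while-loops with index lookahead."""
--     pairs = []
--     accumulating = False
--     key = value = ""
--     depth = 0
--     for line in content.splitlines():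
--         if accumulating:
--             value += "\n" + line
--             depth += line.count("{") - line.count("}")
--             if depth <= 0:
--                 pairs.append((key, value.strip()))
--                 accumulating = False
--             continue
--         s = line.strip()
--         if not s or s.startswith("#") or "=" not in s:
--             continue
--         key, value = s.split("=", 1)
--         key = key.strip()
--         value = value.strip()
--         if "{" in value and value.count("{") - value.count("}") > 0:
--             depth = value.count("{") - value.count("}")
--             accumulating = True
--             continue
--         pairs.append((key, value))
--     if accumulating:
--         pairs.append((key, value.strip()))
--     return pairs
-- ===== Notes on version B (the rewrite author's own statement) =====
-- stated objective: alternative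
-- what changed: Replaces A's nested while-loops (index-based outer loop with an inner lookahead loop consuming brace-continuation lines) by a single flat pass over the lines with a mode flag and a running brace-depth counter, flushing any still-open block at EOF.
import Mathlib
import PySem

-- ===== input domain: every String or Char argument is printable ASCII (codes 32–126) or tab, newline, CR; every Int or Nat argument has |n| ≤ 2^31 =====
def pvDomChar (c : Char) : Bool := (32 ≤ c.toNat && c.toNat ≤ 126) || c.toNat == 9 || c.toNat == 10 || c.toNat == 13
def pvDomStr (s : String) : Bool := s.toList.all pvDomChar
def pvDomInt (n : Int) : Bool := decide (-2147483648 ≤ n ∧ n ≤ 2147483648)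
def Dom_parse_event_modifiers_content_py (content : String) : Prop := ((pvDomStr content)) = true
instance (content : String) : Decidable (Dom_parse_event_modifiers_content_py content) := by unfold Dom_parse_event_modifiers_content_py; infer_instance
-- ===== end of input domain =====

-- B replaces A's nested while-loops (index with inner lookahead loop) by one flat pass
-- over the lines with a mode flag and a running brace depth; objective: alternative.


-- ===== PORT A =====

-- line.count("{") - line.count("}")  (used textually by both Pythons)
def pvBraces (line : String) : Int :=
  (PySem.Str.count line "{" : Int) - (PySem.Str.count line "}" : Int)

-- A's inner while: `while depth > 0 and i + 1 < len(lines): …` consuming lines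
def pvInnerA (value : String) (rest : List String) (depth : Int) : String × List String :=
  match rest with
  | [] => (value, [])
  | next :: rest' =>
      if depth > 0 then
        pvInnerA (value ++ "\n" ++ next) rest' (depth + pvBraces next)
      else (value, next :: rest')

theorem pvInnerA_len (rest : List String) (value : String) (depth : Int) :
    (pvInnerA value rest depth).2.length ≤ rest.length := by
  induction rest generalizing value depth with
  | nil => simp [pvInnerA]
  | cons next rest' ih =>
      by_cases h : depth > 0
      · simp only [pvInnerA, if_pos h]
        exact le_trans (ih _ _) (Nat.le_succ _)
      · simp [pvInnerA, if_neg h]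

-- A's outer while over the line index
def pvOuterA (lines : List String) : List (String × String) :=
  match lines with
  | [] => []
  | line :: rest =>
      let s := PySem.Str.strip line
      if s = "" ∨ PySem.Str.startswith s "#" then pvOuterA rest
      else if ¬ PySem.Str.isIn "=" s then pvOuterA rest
      else
        let parts := (PySem.Str.splitMax? s "=" 1).getD []
        let key := PySem.Str.strip (parts.getD 0 "")
        let value := PySem.Str.strip (parts.getD 1 "")
        if PySem.Str.isIn "{" value then
          let p := pvInnerA value rest (pvBraces value)
          (key, PySem.Str.strip p.1) :: pvOuterA p.2
        else
          (key, value) :: pvOuterA rest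
termination_by lines.length
decreasing_by
  all_goals simp
  exact pvInnerA_len rest _ _

def parse_event_modifiers_content_py (content : String) : List (String × String) :=
  pvOuterA (PySem.Str.splitlines content)

-- ===== PORT B =====

-- state: (pairs, accumulating, key, value, depth)
def pvStepB (st : List (String × String) × Bool × String × String × Int)
    (line : String) : List (String × String) × Bool × String × String × Int :=
  match st with
  | (pairs, acc, key, value, depth) =>
    if acc then
      let value := value ++ "\n" ++ line
      let depth := depth + pvBraces line
      if depth ≤ 0 then (pairs ++ [(key, PySem.Str.strip value)], false, key, value, depth)
      else (pairs, true, key, value, depth)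
    else
      let s := PySem.Str.strip line
      if s = "" ∨ PySem.Str.startswith s "#" ∨ ¬ PySem.Str.isIn "=" s then
        (pairs, acc, key, value, depth)
      else
        let parts := (PySem.Str.splitMax? s "=" 1).getD []
        let key := PySem.Str.strip (parts.getD 0 "")
        let value := PySem.Str.strip (parts.getD 1 "")
        if PySem.Str.isIn "{" value ∧ pvBraces value > 0 then
          (pairs, true, key, value, pvBraces value)
        else (pairs ++ [(key, value)], false, key, value, depth)

-- final flush: `if accumulating: pairs.append((key, value.strip()))`
def pvFlushB (st : List (String × String) × Bool × String × String × Int) :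
    List (String × String) :=
  match st with
  | (pairs, acc, key, value, _) =>
      if acc then pairs ++ [(key, PySem.Str.strip value)] else pairs

def parse_event_modifiers_content_py_alt (content : String) : List (String × String) :=
  pvFlushB ((PySem.Str.splitlines content).foldl pvStepB ([], false, "", "", 0))

-- ===== PRECONDITION & SPEC =====
def Spec_parse_event_modifiers_content_py (content : String) (out : List (String × String)) : Prop := out = parse_event_modifiers_content_py_alt content
instance (content : String) (out : List (String × String)) : Decidable (Spec_parse_event_modifiers_content_py content out) := by unfold Spec_parse_event_modifiers_content_py; infer_instance

-- ===== CLAIM (what is proved, stated in full; the proofs are below) =====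
def Claim_equal_parse_event_modifiers_content_py : Prop := ∀ (content : String), Dom_parse_event_modifiers_content_py content → Spec_parse_event_modifiers_content_py content (parse_event_modifiers_content_py content)

-- ===== LEMMAS AND PROOFS =====

theorem pv_dropWhile_idem {α : Type} (p : α → Bool) (l : List α) :
    (l.dropWhile p).dropWhile p = l.dropWhile p := by
  induction l with
  | nil => simp
  | cons a t ih =>
    by_cases h : p a
    · simp [h, ih]
    · simp [h]

theorem pv_dropWhile_of_prefix {α : Type} (p : α → Bool) (u t : List α)
    (hpre : u <+: t) (ht : t.dropWhile p = t) : u.dropWhile p = u := by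
  rw [List.dropWhile_eq_self_iff] at ht ⊢
  intro hl
  have h0 : 0 < t.length := lt_of_lt_of_le hl hpre.length_le
  have hg : u[0] = t[0] := List.IsPrefix.getElem hpre hl
  rw [hg]
  exact ht h0

theorem pv_strip_idem (s : List Char) :
    PySem.Chars.strip (PySem.Chars.strip s) = PySem.Chars.strip s := by
  unfold PySem.Chars.strip PySem.Chars.rstrip PySem.Chars.lstrip
  set p := PySem.Chars.isspace with hp
  set t := List.dropWhile p s with htdef
  have ht : t.dropWhile p = t := by rw [htdef]; exact pv_dropWhile_idem p s
  have hpre : (List.dropWhile p t.reverse).reverse <+: t := by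
    have := List.reverse_prefix.mpr (List.dropWhile_suffix (l := t.reverse) p)
    simpa using this
  have h1 : ((List.dropWhile p t.reverse).reverse).dropWhile p
      = (List.dropWhile p t.reverse).reverse :=
    pv_dropWhile_of_prefix p _ t hpre ht
  rw [h1, List.reverse_reverse, pv_dropWhile_idem]

theorem pv_str_strip_idem (s : String) :
    PySem.Str.strip (PySem.Str.strip s) = PySem.Str.strip s := by
  rw [← String.toList_inj]
  rw [PySem.Str.toList_strip, PySem.Str.toList_strip, pv_strip_idem]

-- depth ≤ 0: A's inner loop body never runs
theorem pvInnerA_nonpos (value : String) (rest : List String) (depth : Int)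
    (h : ¬ depth > 0) : pvInnerA value rest depth = (value, rest) := by
  cases rest <;> simp [pvInnerA, if_neg h]

-- step lemmas for pvStepB
theorem pvStepB_skip (pairs : List (String × String)) (k v : String) (d : Int) (line : String)
    (h : PySem.Str.strip line = "" ∨ PySem.Str.startswith (PySem.Str.strip line) "#"
        ∨ ¬ PySem.Str.isIn "=" (PySem.Str.strip line)) :
    pvStepB (pairs, false, k, v, d) line = (pairs, false, k, v, d) := by
  simp only [pvStepB, Bool.false_eq_true, if_false]
  rw [if_pos h]

theorem pvStepB_push (pairs : List (String × String)) (k v : String) (d : Int) (line : String)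
    (h : ¬ (PySem.Str.strip line = "" ∨ PySem.Str.startswith (PySem.Str.strip line) "#"
        ∨ ¬ PySem.Str.isIn "=" (PySem.Str.strip line)))
    (hb : ¬ (PySem.Str.isIn "{" (PySem.Str.strip ((((PySem.Str.splitMax? (PySem.Str.strip line) "=" 1).getD []).getD 1 "")))
        ∧ pvBraces (PySem.Str.strip ((((PySem.Str.splitMax? (PySem.Str.strip line) "=" 1).getD []).getD 1 ""))) > 0)) :
    pvStepB (pairs, false, k, v, d) line =
      (pairs ++ [(PySem.Str.strip ((((PySem.Str.splitMax? (PySem.Str.strip line) "=" 1).getD []).getD 0 "")),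
                  PySem.Str.strip ((((PySem.Str.splitMax? (PySem.Str.strip line) "=" 1).getD []).getD 1 "")))],
        false,
        PySem.Str.strip ((((PySem.Str.splitMax? (PySem.Str.strip line) "=" 1).getD []).getD 0 "")),
        PySem.Str.strip ((((PySem.Str.splitMax? (PySem.Str.strip line) "=" 1).getD []).getD 1 "")), d) := by
  simp only [pvStepB, Bool.false_eq_true, if_false]
  rw [if_neg h, if_neg hb]

theorem pvStepB_enter (pairs : List (String × String)) (k v : String) (d : Int) (line : String)
    (h : ¬ (PySem.Str.strip line = "" ∨ PySem.Str.startswith (PySem.Str.strip line) "#"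
        ∨ ¬ PySem.Str.isIn "=" (PySem.Str.strip line)))
    (hb : PySem.Str.isIn "{" (PySem.Str.strip ((((PySem.Str.splitMax? (PySem.Str.strip line) "=" 1).getD []).getD 1 "")))
        ∧ pvBraces (PySem.Str.strip ((((PySem.Str.splitMax? (PySem.Str.strip line) "=" 1).getD []).getD 1 ""))) > 0) :
    pvStepB (pairs, false, k, v, d) line =
      (pairs, true,
        PySem.Str.strip ((((PySem.Str.splitMax? (PySem.Str.strip line) "=" 1).getD []).getD 0 "")),
        PySem.Str.strip ((((PySem.Str.splitMax? (PySem.Str.strip line) "=" 1).getD []).getD 1 "")),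
        pvBraces (PySem.Str.strip ((((PySem.Str.splitMax? (PySem.Str.strip line) "=" 1).getD []).getD 1 "")))) := by
  simp only [pvStepB, Bool.false_eq_true, if_false]
  rw [if_neg h, if_pos hb]

theorem pvStepB_acc_close (pairs : List (String × String)) (k v : String) (d : Int) (line : String)
    (h : d + pvBraces line ≤ 0) :
    pvStepB (pairs, true, k, v, d) line =
      (pairs ++ [(k, PySem.Str.strip (v ++ "\n" ++ line))], false, k, v ++ "\n" ++ line, d + pvBraces line) := by
  simp only [pvStepB, if_true]
  rw [if_pos h]

theorem pvStepB_acc_open (pairs : List (String × String)) (k v : String) (d : Int) (line : String)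
    (h : ¬ d + pvBraces line ≤ 0) :
    pvStepB (pairs, true, k, v, d) line =
      (pairs, true, k, v ++ "\n" ++ line, d + pvBraces line) := by
  simp only [pvStepB, if_true]
  rw [if_neg h]

-- unfolding lemmas for pvOuterA
theorem pvOuterA_skip1 (line : String) (rest : List String)
    (h : PySem.Str.strip line = "" ∨ PySem.Str.startswith (PySem.Str.strip line) "#") :
    pvOuterA (line :: rest) = pvOuterA rest := by
  rw [pvOuterA]
  simp only []
  rw [if_pos h]

theorem pvOuterA_skip2 (line : String) (rest : List String)
    (h1 : ¬ (PySem.Str.strip line = "" ∨ PySem.Str.startswith (PySem.Str.strip line) "#"))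
    (h2 : ¬ PySem.Str.isIn "=" (PySem.Str.strip line)) :
    pvOuterA (line :: rest) = pvOuterA rest := by
  rw [pvOuterA]
  simp only []
  rw [if_neg h1, if_pos h2]

theorem pvOuterA_brace (line : String) (rest : List String)
    (h1 : ¬ (PySem.Str.strip line = "" ∨ PySem.Str.startswith (PySem.Str.strip line) "#"))
    (h2 : PySem.Str.isIn "=" (PySem.Str.strip line))
    (h3 : PySem.Str.isIn "{" (PySem.Str.strip ((((PySem.Str.splitMax? (PySem.Str.strip line) "=" 1).getD []).getD 1 "")))) :
    pvOuterA (line :: rest) =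
      (PySem.Str.strip ((((PySem.Str.splitMax? (PySem.Str.strip line) "=" 1).getD []).getD 0 "")),
        PySem.Str.strip ((pvInnerA (PySem.Str.strip ((((PySem.Str.splitMax? (PySem.Str.strip line) "=" 1).getD []).getD 1 ""))) rest
          (pvBraces (PySem.Str.strip ((((PySem.Str.splitMax? (PySem.Str.strip line) "=" 1).getD []).getD 1 ""))))).1)) ::
      pvOuterA (pvInnerA (PySem.Str.strip ((((PySem.Str.splitMax? (PySem.Str.strip line) "=" 1).getD []).getD 1 ""))) rest
          (pvBraces (PySem.Str.strip ((((PySem.Str.splitMax? (PySem.Str.strip line) "=" 1).getD []).getD 1 ""))))).2 := by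
  rw [pvOuterA]
  simp only []
  rw [if_neg h1, if_neg (not_not_intro h2), if_pos h3]

theorem pvOuterA_plain (line : String) (rest : List String)
    (h1 : ¬ (PySem.Str.strip line = "" ∨ PySem.Str.startswith (PySem.Str.strip line) "#"))
    (h2 : PySem.Str.isIn "=" (PySem.Str.strip line))
    (h3 : ¬ PySem.Str.isIn "{" (PySem.Str.strip ((((PySem.Str.splitMax? (PySem.Str.strip line) "=" 1).getD []).getD 1 "")))) :
    pvOuterA (line :: rest) =
      (PySem.Str.strip ((((PySem.Str.splitMax? (PySem.Str.strip line) "=" 1).getD []).getD 0 "")),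
        PySem.Str.strip ((((PySem.Str.splitMax? (PySem.Str.strip line) "=" 1).getD []).getD 1 ""))) :: pvOuterA rest := by
  rw [pvOuterA]
  simp only []
  rw [if_neg h1, if_neg (not_not_intro h2), if_neg h3]

-- mutual invariant: the flat loop in either mode vs A's nested loops
theorem pv_main (lines : List String) :
    (∀ (pairs : List (String × String)) (k v : String) (d : Int),
      pvFlushB (lines.foldl pvStepB (pairs, false, k, v, d)) = pairs ++ pvOuterA lines)
    ∧
    (∀ (pairs : List (String × String)) (k v : String) (d : Int), d > 0 →
      pvFlushB (lines.foldl pvStepB (pairs, true, k, v, d)) =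
        pairs ++ (k, PySem.Str.strip (pvInnerA v lines d).1) :: pvOuterA (pvInnerA v lines d).2) := by
  induction lines with
  | nil =>
    constructor
    · intro pairs k v d; simp [pvFlushB, pvOuterA]
    · intro pairs k v d _; simp [pvFlushB, pvInnerA, pvOuterA]
  | cons line rest ih =>
    obtain ⟨ihP, ihQ⟩ := ih
    constructor
    · intro pairs k v d
      rw [List.foldl_cons]
      by_cases h1 : PySem.Str.strip line = "" ∨ PySem.Str.startswith (PySem.Str.strip line) "#"
      · rw [pvStepB_skip _ _ _ _ _ (h1.imp id Or.inl), ihP, pvOuterA_skip1 _ _ h1]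
      · by_cases h2 : PySem.Str.isIn "=" (PySem.Str.strip line)
        · by_cases h3 : PySem.Str.isIn "{" (PySem.Str.strip ((((PySem.Str.splitMax? (PySem.Str.strip line) "=" 1).getD []).getD 1 "")))
          · by_cases h4 : pvBraces (PySem.Str.strip ((((PySem.Str.splitMax? (PySem.Str.strip line) "=" 1).getD []).getD 1 ""))) > 0
            · rw [pvStepB_enter _ _ _ _ _ (fun hh => hh.elim (fun ha => h1 (Or.inl ha)) (fun hh' => hh'.elim (fun hb => h1 (Or.inr hb)) (fun hn => hn h2))) ⟨h3, h4⟩, ihQ _ _ _ _ h4,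
                pvOuterA_brace _ _ h1 h2 h3]
            · rw [pvStepB_push _ _ _ _ _ (fun hh => hh.elim (fun ha => h1 (Or.inl ha)) (fun hh' => hh'.elim (fun hb => h1 (Or.inr hb)) (fun hn => hn h2))) (fun hc => h4 hc.2), ihP,
                pvOuterA_brace _ _ h1 h2 h3, pvInnerA_nonpos _ _ _ h4]
              simp [pv_str_strip_idem]
          · rw [pvStepB_push _ _ _ _ _ (fun hh => hh.elim (fun ha => h1 (Or.inl ha)) (fun hh' => hh'.elim (fun hb => h1 (Or.inr hb)) (fun hn => hn h2))) (fun hc => h3 hc.1), ihP,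
              pvOuterA_plain _ _ h1 h2 h3]
            simp
        · rw [pvStepB_skip _ _ _ _ _ (Or.inr (Or.inr h2)), ihP, pvOuterA_skip2 _ _ h1 h2]
    · intro pairs k v d hd
      rw [List.foldl_cons]
      by_cases h : d + pvBraces line ≤ 0
      · rw [pvStepB_acc_close _ _ _ _ _ h, ihP]
        rw [show pvInnerA v (line :: rest) d
            = (v ++ "\n" ++ line, rest) by
          rw [pvInnerA, if_pos hd, pvInnerA_nonpos _ _ _ (by omega)]]
        simp
      · rw [pvStepB_acc_open _ _ _ _ _ h, ihQ _ _ _ _ (by omega)]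
        rw [show pvInnerA v (line :: rest) d
            = pvInnerA (v ++ "\n" ++ line) rest (d + pvBraces line) by
          rw [pvInnerA, if_pos hd]]

-- ===== VERDICT (by name: the statement is the Claim_ definition above) =====
theorem parse_event_modifiers_content_py_spec : Claim_equal_parse_event_modifiers_content_py := by
  intro content _
  unfold Spec_parse_event_modifiers_content_py
  unfold parse_event_modifiers_content_py parse_event_modifiers_content_py_alt
  rw [(pv_main (PySem.Str.splitlines content)).1]
  simp
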